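-- pv_equiv track=rewrite | github.com/brnetic/WPServer | transform_rankings.py | find_team_id
-- ===== SOURCE A (Python) =====
-- def normalize_team_name(team_name):
--     """Normalize team name by removing common variations"""
--     if not team_name:
--         return team_name
--
--     # Clean up the team name
--     normalized = team_name.strip()
--
--     # Handle common variations
--     replacements = {
--         "University of California, Berkeley": "University of California",
--         "University of California, Los Angeles": "University of California-Los Angeles",
--         "University of California, Irvine": "University of California-Irvine",
--         "University of California, Santa Barbara": "University of California-Santa Barbara",
--         "University of California, Davis": "University of California-Davis",
--         "University of California, San Diego": "University of California-San Diego",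
--         "St. Francis College (NY)": "Saint Francis",
--         "St. Francis": "Saint Francis",
--         "California Baptist University": "California Baptist University",
--         "Cal Baptist": "California Baptist",
--         "CBU": "California Baptist University",
--     }
--
--     for old_name, new_name in replacements.items():
--         if normalized == old_name:
--             normalized = new_name
--             break
--
--     return normalized
--
-- def find_team_id(team_name, mappings):
--     """Find team ID for a given team name, trying various matching strategies"""
--     if not team_name:
--         return None
--
--     # Try exact match first
--     if team_name in mappings:
--         return mappings[team_name]
--
--     # Try normalized name
--     normalized = normalize_team_name(team_name)
--     if normalized in mappings:
--         return mappings[normalized]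
--
--     # Try case-insensitive match
--     team_name_lower = team_name.lower()
--     for mapped_name, team_id in mappings.items():
--         if mapped_name.lower() == team_name_lower:
--             return team_id
--
--     # Try partial matches for common variations
--     for mapped_name, team_id in mappings.items():
--         # Check if the team name contains key parts of the mapped name
--         if "USC" in team_name and "USC" in mapped_name:
--             return team_id
--         elif "UCLA" in team_name and "UCLA" in mapped_name:
--             return team_id
--         elif "Stanford" in team_name and "Stanford" in mapped_name:
--             return team_id
--         elif "Berkeley" in team_name and ("UC Berkeley" in mapped_name or "California" in mapped_name):
--             return team_id
--         elif "Irvine" in team_name and "Irvine" in mapped_name: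
--             return team_id
--         elif "Santa Barbara" in team_name and ("UCSB" in mapped_name or "Santa Barbara" in mapped_name):
--             return team_id
--         elif "Davis" in team_name and "Davis" in mapped_name:
--             return team_id
--         elif "San Diego" in team_name and "San Diego" in mapped_name:
--             return team_id
--         elif "Pepperdine" in team_name and "Pepperdine" in mapped_name:
--             return team_id
--         elif "Loyola" in team_name and ("LMU" in mapped_name or "Loyola" in mapped_name):
--             return team_id
--         elif "Long Beach" in team_name and "Long Beach" in mapped_name:
--             return team_id
--         elif "Naval Academy" in team_name and ("Navy" in mapped_name or "Naval" in mapped_name):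
--             return team_id
--         elif "Francis" in team_name and "Francis" in mapped_name:
--             return team_id
--
--     return None
-- ===== SOURCE B (Python) =====
-- # Single-pass re-implementation: instead of A's four staged scans over mappings
-- # (exact, normalized, case-insensitive, partial), B scores each mapping once with a
-- # match level (0 exact / 1 normalized / 2 case-insensitive / 3 partial) and keeps the
-- # first mapping with the minimal level, breaking out on an exact match.
--
-- _NORMALIZATIONS = {
--     "University of California, Berkeley": "University of California",
--     "University of California, Los Angeles": "University of California-Los Angeles",
--     "University of California, Irvine": "University of California-Irvine",
--     "University of California, Santa Barbara": "University of California-Santa Barbara",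
--     "University of California, Davis": "University of California-Davis",
--     "University of California, San Diego": "University of California-San Diego",
--     "St. Francis College (NY)": "Saint Francis",
--     "St. Francis": "Saint Francis",
--     "California Baptist University": "California Baptist University",
--     "Cal Baptist": "California Baptist",
--     "CBU": "California Baptist University",
-- }
--
-- _PARTIAL_RULES = [
--     ("USC", ["USC"]),
--     ("UCLA", ["UCLA"]),
--     ("Stanford", ["Stanford"]),
--     ("Berkeley", ["UC Berkeley", "California"]),
--     ("Irvine", ["Irvine"]),
--     ("Santa Barbara", ["UCSB", "Santa Barbara"]),
--     ("Davis", ["Davis"]),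
--     ("San Diego", ["San Diego"]),
--     ("Pepperdine", ["Pepperdine"]),
--     ("Loyola", ["LMU", "Loyola"]),
--     ("Long Beach", ["Long Beach"]),
--     ("Naval Academy", ["Navy", "Naval"]),
--     ("Francis", ["Francis"]),
-- ]
--
-- def find_team_id(team_name, mappings):
--     if not team_name:
--         return None
--     stripped = team_name.strip()
--     normalized = _NORMALIZATIONS.get(stripped, stripped)
--     team_lower = team_name.lower()
--     active = [s for key, subs in _PARTIAL_RULES if key in team_name for s in subs]
--     best_level = 4
--     best_id = None
--     for mapped_name, team_id in mappings.items():
--         if mapped_name == team_name: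
--             return team_id
--         if mapped_name == normalized:
--             level = 1
--         elif mapped_name.lower() == team_lower:
--             level = 2
--         elif any(s in mapped_name for s in active):
--             level = 3
--         else:
--             continue
--         if level < best_level:
--             best_level = level
--             best_id = team_id
--     return best_id
-- ===== Notes on version B (the rewrite author's own statement) =====
-- stated objective: faster
-- what changed: A tries four complete passes over mappings in sequence (exact, normalized, case-insensitive, partial elif-chain whose team_name substring tests are re-evaluated for every mapping); B makes a single pass that scores each mapping once with a match level (0 exact, 1 normalized, 2 case-insensitive, 3 partial via a substring list precomputed from team_name once) and keeps the first mapping with the minimal level, breaking on an exact match.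
import Mathlib
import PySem

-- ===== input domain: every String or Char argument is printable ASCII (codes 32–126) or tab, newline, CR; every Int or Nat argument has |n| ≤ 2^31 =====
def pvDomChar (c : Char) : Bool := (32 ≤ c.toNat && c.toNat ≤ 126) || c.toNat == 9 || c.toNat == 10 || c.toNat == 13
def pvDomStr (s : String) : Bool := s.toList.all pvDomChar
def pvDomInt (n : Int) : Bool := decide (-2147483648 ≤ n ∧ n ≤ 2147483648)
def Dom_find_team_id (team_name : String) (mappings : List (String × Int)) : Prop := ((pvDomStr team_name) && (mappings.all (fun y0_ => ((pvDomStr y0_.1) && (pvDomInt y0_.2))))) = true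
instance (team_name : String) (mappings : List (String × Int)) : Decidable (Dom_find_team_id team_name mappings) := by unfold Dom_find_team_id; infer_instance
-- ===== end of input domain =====

-- B replaces A's four staged passes over mappings with ONE pass that scores each mapping
-- with a match level (0 exact, 1 normalized, 2 case-insensitive, 3 partial) and keeps the
-- first mapping of minimal level (alternative decomposition; no speed claim).

-- shared constant: the normalization replacement table (same literal pairs in both Pythons)
def pvRepl : List (String × String) :=
  [("University of California, Berkeley", "University of California"),
   ("University of California, Los Angeles", "University of California-Los Angeles"),
   ("University of California, Irvine", "University of California-Irvine"),
   ("University of California, Santa Barbara", "University of California-Santa Barbara"),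
   ("University of California, Davis", "University of California-Davis"),
   ("University of California, San Diego", "University of California-San Diego"),
   ("St. Francis College (NY)", "Saint Francis"),
   ("St. Francis", "Saint Francis"),
   ("California Baptist University", "California Baptist University"),
   ("Cal Baptist", "California Baptist"),
   ("CBU", "California Baptist University")]

-- ===== PORT A =====
-- A's normalize loop: first matching old name wins, with break
def normLoopA (normalized : String) : List (String × String) → String
  | [] => normalized
  | (o, n) :: rest => if normalized == o then n else normLoopA normalized rest

def normalize_team_name (team_name : String) : String :=
  if team_name == "" then team_name
  else normLoopA (PySem.Str.strip team_name) pvRepl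

-- A's case-insensitive loop
def lowerLoopA (tl : String) : List (String × Int) → Option Int
  | [] => none
  | (m, tid) :: rest => if PySem.Str.lower m == tl then some tid else lowerLoopA tl rest

-- A's partial-match loop: the 13-branch elif chain, per mapping
def partialLoopA (t : String) : List (String × Int) → Option Int
  | [] => none
  | (m, tid) :: rest =>
    if PySem.Str.isIn "USC" t && PySem.Str.isIn "USC" m then some tid
    else if PySem.Str.isIn "UCLA" t && PySem.Str.isIn "UCLA" m then some tid
    else if PySem.Str.isIn "Stanford" t && PySem.Str.isIn "Stanford" m then some tid
    else if PySem.Str.isIn "Berkeley" t && (PySem.Str.isIn "UC Berkeley" m || PySem.Str.isIn "California" m) then some tid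
    else if PySem.Str.isIn "Irvine" t && PySem.Str.isIn "Irvine" m then some tid
    else if PySem.Str.isIn "Santa Barbara" t && (PySem.Str.isIn "UCSB" m || PySem.Str.isIn "Santa Barbara" m) then some tid
    else if PySem.Str.isIn "Davis" t && PySem.Str.isIn "Davis" m then some tid
    else if PySem.Str.isIn "San Diego" t && PySem.Str.isIn "San Diego" m then some tid
    else if PySem.Str.isIn "Pepperdine" t && PySem.Str.isIn "Pepperdine" m then some tid
    else if PySem.Str.isIn "Loyola" t && (PySem.Str.isIn "LMU" m || PySem.Str.isIn "Loyola" m) then some tid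
    else if PySem.Str.isIn "Long Beach" t && PySem.Str.isIn "Long Beach" m then some tid
    else if PySem.Str.isIn "Naval Academy" t && (PySem.Str.isIn "Navy" m || PySem.Str.isIn "Naval" m) then some tid
    else if PySem.Str.isIn "Francis" t && PySem.Str.isIn "Francis" m then some tid
    else partialLoopA t rest

def find_team_id (team_name : String) (mappings : List (String × Int)) : Option Int :=
  if team_name == "" then none
  else match mappings.lookup team_name with
  | some v => some v
  | none =>
    let normalized := normalize_team_name team_name
    match mappings.lookup normalized with
    | some v => some v
    | none =>
      let tl := PySem.Str.lower team_name
      match lowerLoopA tl mappings with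
      | some v => some v
      | none => partialLoopA team_name mappings

-- ===== PORT B =====
-- B's rule table: (team_name substring, accepted mapped_name substrings)
def pvRules : List (String × List String) :=
  [("USC", ["USC"]),
   ("UCLA", ["UCLA"]),
   ("Stanford", ["Stanford"]),
   ("Berkeley", ["UC Berkeley", "California"]),
   ("Irvine", ["Irvine"]),
   ("Santa Barbara", ["UCSB", "Santa Barbara"]),
   ("Davis", ["Davis"]),
   ("San Diego", ["San Diego"]),
   ("Pepperdine", ["Pepperdine"]),
   ("Loyola", ["LMU", "Loyola"]),
   ("Long Beach", ["Long Beach"]),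
   ("Naval Academy", ["Navy", "Naval"]),
   ("Francis", ["Francis"])]

-- B's single pass: keep (best_level, best_id), return immediately on an exact match
def bestLoop (t normalized tl : String) (active : List String) :
    List (String × Int) → Nat → Option Int → Option Int
  | [], _, bestId => bestId
  | (n, tid) :: rest, bestLevel, bestId =>
    if n == t then some tid
    else
      match (if n == normalized then some 1
             else if PySem.Str.lower n == tl then some 2
             else if active.any (fun s => PySem.Str.isIn s n) then some 3
             else (none : Option Nat)) with
      | none => bestLoop t normalized tl active rest bestLevel bestId
      | some level =>
        if level < bestLevel then bestLoop t normalized tl active rest level (some tid)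
        else bestLoop t normalized tl active rest bestLevel bestId

def find_team_id_alt (team_name : String) (mappings : List (String × Int)) : Option Int :=
  if team_name == "" then none
  else
    let stripped := PySem.Str.strip team_name
    let normalized := (pvRepl.lookup stripped).getD stripped
    let tl := PySem.Str.lower team_name
    let active := (pvRules.filter (fun r => PySem.Str.isIn r.1 team_name)).flatMap (·.2)
    bestLoop team_name normalized tl active mappings 4 none

-- ===== PRECONDITION & SPEC =====
def Spec_find_team_id (team_name : String) (mappings : List (String × Int)) (out : Option Int) : Prop := out = find_team_id_alt team_name mappings
instance (team_name : String) (mappings : List (String × Int)) (out : Option Int) : Decidable (Spec_find_team_id team_name mappings out) := by unfold Spec_find_team_id; infer_instance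

-- ===== CLAIM (what is proved, stated in full; the proofs are below) =====
def Claim_equal_find_team_id : Prop := ∀ (team_name : String) (mappings : List (String × Int)), Dom_find_team_id team_name mappings → Spec_find_team_id team_name mappings (find_team_id team_name mappings)

-- ===== LEMMAS AND PROOFS =====

-- first id whose mapped name satisfies p (proof-side canonical scan)
def firstId (p : String → Bool) : List (String × Int) → Option Int
  | [] => none
  | (n, tid) :: rest => if p n then some tid else firstId p rest

def orE : Option Int → Option Int → Option Int
  | some v, _ => some v
  | none, b => b

-- the per-element effective level predicates of B's single pass
def pq1 (t normalized : String) (n : String) : Bool := !(n == t) && (n == normalized)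
def pq2 (t normalized tl : String) (n : String) : Bool :=
  !(n == t) && !(n == normalized) && (PySem.Str.lower n == tl)
def pq3 (t normalized tl : String) (active : List String) (n : String) : Bool :=
  !(n == t) && !(n == normalized) && !(PySem.Str.lower n == tl) && active.any (fun s => PySem.Str.isIn s n)

-- what bestLoop computes for each possible bound
def belowB (t normalized tl : String) (active : List String) :
    Nat → List (String × Int) → Option Int → Option Int
  | 0, _, d => d
  | 1, l, d => orE (firstId (fun n => n == t) l) d
  | 2, l, d => orE (firstId (fun n => n == t) l) (orE (firstId (pq1 t normalized) l) d)
  | 3, l, d => orE (firstId (fun n => n == t) l)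
      (orE (firstId (pq1 t normalized) l) (orE (firstId (pq2 t normalized tl) l) d))
  | _+4, l, d => orE (firstId (fun n => n == t) l)
      (orE (firstId (pq1 t normalized) l)
        (orE (firstId (pq2 t normalized tl) l) (orE (firstId (pq3 t normalized tl active) l) d)))

-- orE absorbs a later some
theorem orE_orE_some (a : Option Int) (v : Int) (x : Option Int) :
    orE a (orE (some v) x) = orE a (some v) := by cases a <;> rfl

theorem bestLoop_eq (t normalized tl : String) (active : List String) (l : List (String × Int)) :
    ∀ b d, 1 ≤ b → bestLoop t normalized tl active l b d = belowB t normalized tl active b l d := by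
  induction l with
  | nil =>
    intro b d hb
    match b, hb with
    | 1, _ => rfl
    | 2, _ => rfl
    | 3, _ => rfl
    | (k+4), _ => rfl
  | cons hd rest ih =>
    intro b d hb
    obtain ⟨n, tid⟩ := hd
    by_cases h0 : n = t
    · match b, hb with
      | 1, _ => simp [bestLoop, belowB, firstId, orE, h0]
      | 2, _ => simp [bestLoop, belowB, firstId, orE, h0]
      | 3, _ => simp [bestLoop, belowB, firstId, orE, h0]
      | (k+4), _ => simp [bestLoop, belowB, firstId, orE, h0]
    · by_cases h1 : n = normalized
      · -- level 1
        subst h1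
        have i1 := fun d => ih 1 d (by omega)
        match b, hb with
        | 1, _ => simp [bestLoop, belowB, firstId, pq1, h0, i1]
        | 2, _ => simp [bestLoop, belowB, firstId, orE, pq1, h0, i1, orE_orE_some]
        | 3, _ => simp [bestLoop, belowB, firstId, orE, pq1, pq2, h0, i1, orE_orE_some]
        | (k+4), _ =>
          simp [bestLoop, belowB, firstId, orE, pq1, pq2, pq3, h0, i1, orE_orE_some,
            (show (1:ℕ) < k+4 by omega)]
      · by_cases h2 : PySem.Str.lower n = tl
        · -- level 2
          subst h2
          have i1 := fun d => ih 1 d (by omega)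
          have i2 := fun d => ih 2 d (by omega)
          match b, hb with
          | 1, _ => simp [bestLoop, belowB, firstId, h0, h1, i1]
          | 2, _ => simp [bestLoop, belowB, firstId, pq1, h0, h1, i2]
          | 3, _ => simp [bestLoop, belowB, firstId, orE, pq1, pq2, h0, h1, i2, orE_orE_some]
          | (k+4), _ =>
            simp [bestLoop, belowB, firstId, orE, pq1, pq2, pq3, h0, h1, i2, orE_orE_some,
              (show (2:ℕ) < k+4 by omega)]
        · by_cases h3 : (active.any (fun s => PySem.Str.isIn s n)) = true
          all_goals simp at h3
          · -- level 3
            have i1 := fun d => ih 1 d (by omega)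
            have i2 := fun d => ih 2 d (by omega)
            have i3 := fun d => ih 3 d (by omega)
            match b, hb with
            | 1, _ => simp [bestLoop, belowB, firstId, h0, h1, h2, h3, i1]
            | 2, _ => simp [bestLoop, belowB, firstId, pq1, h0, h1, h2, h3, i2]
            | 3, _ => simp [bestLoop, belowB, firstId, pq1, pq2, h0, h1, h2, h3, i3]
            | (k+4), _ =>
              simp [bestLoop, belowB, firstId, orE, pq1, pq2, pq3, h0, h1, h2, h3, i3, orE_orE_some,
                (show (3:ℕ) < k+4 by omega)]
          · -- no level
            have h3' : ¬ ∃ x ∈ active, PySem.Chars.isIn x.toList n.toList = true := by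
              push_neg; intro x hx; simpa using h3 x hx
            match b, hb with
            | 1, _ => simp [bestLoop, belowB, firstId, h0, h1, h2, h3', ih 1 d (by omega)]
            | 2, _ => simp [bestLoop, belowB, firstId, pq1, h0, h1, h2, h3', ih 2 d (by omega)]
            | 3, _ => simp [bestLoop, belowB, firstId, pq1, pq2, h0, h1, h2, h3', ih 3 d (by omega)]
            | (k+4), _ =>
              simp [bestLoop, belowB, firstId, pq1, pq2, pq3, h0, h1, h2, h3', ih (k+4) d (by omega)]

-- A's lookup is the canonical scan with the exact-equality predicate
theorem lookup_eq_firstId (t : String) (l : List (String × Int)) :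
    l.lookup t = firstId (fun n => n == t) l := by
  induction l with
  | nil => rfl
  | cons hd rest ih =>
    obtain ⟨a, v⟩ := hd
    by_cases h : a = t
    · simp [List.lookup, firstId, h]
    · have h1 : (t == a) = false := by simp [Ne.symm h]
      have h2 : (a == t) = false := by simp [h]
      simp [List.lookup, firstId, h1, h2, ih]

-- A's first-match replacement loop is a lookup-with-default
theorem normLoopA_eq_lookup (s : String) (l : List (String × String)) :
    normLoopA s l = (l.lookup s).getD s := by
  induction l with
  | nil => rfl
  | cons h t ih =>
    obtain ⟨o, n⟩ := h
    by_cases ho : s = o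
    · simp [normLoopA, List.lookup, ho]
    · have h1 : (s == o) = false := by simp [ho]
      simp [normLoopA, List.lookup, h1, ih]

-- A's case-insensitive loop is a canonical scan
theorem lowerLoopA_eq (tl : String) (l : List (String × Int)) :
    lowerLoopA tl l = firstId (fun n => PySem.Str.lower n == tl) l := by
  induction l with
  | nil => rfl
  | cons h t ih => obtain ⟨m, tid⟩ := h; simp [lowerLoopA, firstId, ih]

-- collapse 'elif returning the same value' into a disjunction
theorem pvIteOr {α : Type} (c d : Bool) (x y : α) :
    (if c then x else if d then x else y) = if (c || d) then x else y := by
  cases c <;> simp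

-- scanning the flattened filtered rule list = the guarded disjunction over all rules
theorem any_filter_flatMap {α β : Type} (l : List α) (p : α → Bool) (f : α → List β) (q : β → Bool) :
    (((l.filter p).flatMap f).any q) = l.any (fun r => p r && (f r).any q) := by
  induction l with
  | nil => rfl
  | cons h t ih =>
    by_cases hp : p h = true
    · simp [hp, ih]
    · simp [hp, ih, Bool.false_and]

-- A's elif chain per mapping equals B's flattened active-substring predicate
theorem chain_eq_pred (t m : String) :
    ((((pvRules.filter (fun r => PySem.Str.isIn r.1 t)).flatMap (·.2)).any
        (fun s => PySem.Str.isIn s m))) =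
    (PySem.Str.isIn "USC" t && PySem.Str.isIn "USC" m
      || PySem.Str.isIn "UCLA" t && PySem.Str.isIn "UCLA" m
      || PySem.Str.isIn "Stanford" t && PySem.Str.isIn "Stanford" m
      || PySem.Str.isIn "Berkeley" t && (PySem.Str.isIn "UC Berkeley" m || PySem.Str.isIn "California" m)
      || PySem.Str.isIn "Irvine" t && PySem.Str.isIn "Irvine" m
      || PySem.Str.isIn "Santa Barbara" t && (PySem.Str.isIn "UCSB" m || PySem.Str.isIn "Santa Barbara" m)
      || PySem.Str.isIn "Davis" t && PySem.Str.isIn "Davis" m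
      || PySem.Str.isIn "San Diego" t && PySem.Str.isIn "San Diego" m
      || PySem.Str.isIn "Pepperdine" t && PySem.Str.isIn "Pepperdine" m
      || PySem.Str.isIn "Loyola" t && (PySem.Str.isIn "LMU" m || PySem.Str.isIn "Loyola" m)
      || PySem.Str.isIn "Long Beach" t && PySem.Str.isIn "Long Beach" m
      || PySem.Str.isIn "Naval Academy" t && (PySem.Str.isIn "Navy" m || PySem.Str.isIn "Naval" m)
      || PySem.Str.isIn "Francis" t && PySem.Str.isIn "Francis" m) := by
  rw [any_filter_flatMap]
  simp [pvRules, List.any_cons, List.any_nil, Bool.or_false, Bool.or_assoc]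

-- A's partial loop is a canonical scan with the flattened predicate
theorem partialLoopA_eq (t : String) (l : List (String × Int)) :
    partialLoopA t l =
      firstId (fun m => (((pvRules.filter (fun r => PySem.Str.isIn r.1 t)).flatMap (·.2)).any
        (fun s => PySem.Str.isIn s m))) l := by
  induction l with
  | nil => rfl
  | cons h rest ih =>
    obtain ⟨m, tid⟩ := h
    simp only [partialLoopA, firstId, pvIteOr, chain_eq_pred, Bool.or_assoc, ih]

theorem firstId_eq_none (p : String → Bool) (l : List (String × Int)) (h : firstId p l = none) :
    ∀ x ∈ l, p x.1 = false := by
  induction l with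
  | nil => intro x hx; cases hx
  | cons hd rest ih =>
    intro x hx
    by_cases hp : p hd.1 = true
    · exfalso; obtain ⟨n, tid⟩ := hd; simp [firstId, hp] at h
    · obtain ⟨n, tid⟩ := hd
      simp only [firstId] at h
      rw [if_neg (by simpa using hp)] at h
      rcases List.mem_cons.mp hx with hx | hx
      · subst hx; simpa using hp
      · exact ih h x hx

theorem firstId_congr (p q : String → Bool) (l : List (String × Int))
    (h : ∀ x ∈ l, p x.1 = q x.1) : firstId p l = firstId q l := by
  induction l with
  | nil => rfl
  | cons hd rest ih =>
    obtain ⟨n, tid⟩ := hd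
    have hn := h (n, tid) (by simp)
    simp only [firstId, hn]
    rw [ih (fun x hx => h x (by simp [hx]))]

-- ===== VERDICT (by name: the statement is the Claim_ definition above) =====
theorem find_team_id_spec : Claim_equal_find_team_id := by
  intro t maps _
  unfold Spec_find_team_id
  by_cases ht : t = ""
  · simp [find_team_id, find_team_id_alt, ht]
  · have hne : (t == "") = false := by simp [ht]
    -- names for the four stage predicates
    set normalized := (pvRepl.lookup (PySem.Str.strip t)).getD (PySem.Str.strip t) with hnormdef
    have hnorm : normalize_team_name t = normalized := by
      rw [normalize_team_name, if_neg (by simp [ht]), normLoopA_eq_lookup]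
    set tl := PySem.Str.lower t
    set active := (pvRules.filter (fun r => PySem.Str.isIn r.1 t)).flatMap (·.2) with hact
    -- rewrite both sides into orE chains of canonical scans
    have hA : find_team_id t maps =
        orE (firstId (fun n => n == t) maps)
          (orE (firstId (fun n => n == normalized) maps)
            (orE (firstId (fun n => PySem.Str.lower n == tl) maps)
              (firstId (fun m => active.any (fun s => PySem.Str.isIn s m)) maps))) := by
      rw [find_team_id, if_neg (by simp [ht])]
      simp only [hnorm, lookup_eq_firstId, lowerLoopA_eq, partialLoopA_eq, ← hact]
      cases firstId (fun n => n == t) maps <;>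
        cases firstId (fun n => n == normalized) maps <;>
          cases firstId (fun n => PySem.Str.lower n == tl) maps <;> rfl
    have hB : find_team_id_alt t maps =
        orE (firstId (fun n => n == t) maps)
          (orE (firstId (pq1 t normalized) maps)
            (orE (firstId (pq2 t normalized tl) maps)
              (orE (firstId (pq3 t normalized tl active) maps) none))) := by
      rw [find_team_id_alt, if_neg (by simp [ht])]
      exact bestLoop_eq t normalized tl active maps 4 none (by omega)
    rw [hA, hB]
    -- stage-by-stage: if an earlier stage finds nothing, its predicate is false pointwise
    cases hf0 : firstId (fun n => n == t) maps with
    | some v => rfl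
    | none =>
      have h0 := firstId_eq_none _ _ hf0
      have e1 : firstId (fun n => n == normalized) maps = firstId (pq1 t normalized) maps :=
        firstId_congr _ _ _ (fun x hx => by simp [pq1, h0 x hx])
      simp only [orE, ← e1]
      cases hf1 : firstId (fun n => n == normalized) maps with
      | some v => rfl
      | none =>
        have h1 := firstId_eq_none _ _ hf1
        have e2 : firstId (fun n => PySem.Str.lower n == tl) maps = firstId (pq2 t normalized tl) maps :=
          firstId_congr _ _ _ (fun x hx => by simp [pq2, h0 x hx, h1 x hx])
        simp only [orE, ← e2]
        cases hf2 : firstId (fun n => PySem.Str.lower n == tl) maps with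
        | some v => rfl
        | none =>
          have h2 := firstId_eq_none _ _ hf2
          have e3 : firstId (fun m => active.any (fun s => PySem.Str.isIn s m)) maps
              = firstId (pq3 t normalized tl active) maps :=
            firstId_congr _ _ _ (fun x hx => by simp [pq3, h0 x hx, h1 x hx, h2 x hx])
          simp only [orE, ← e3]
          cases firstId (fun m => active.any (fun s => PySem.Str.isIn s m)) maps <;> rfl
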